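-- pv_equiv track=rewrite | github.com/AlonsoCerpa/Compilers | codigos/practica0.py | encontrar_longitud_de_numero_en_cadena
-- ===== SOURCE A (Python) =====
-- def encontrar_longitud_de_numero_en_cadena(cadena):
--     caract_de_numeros = "0123456789."
--     i = 0
--     for caract in cadena:
--         if caract not in caract_de_numeros:
--             return i
--         i += 1
--     return i
-- ===== SOURCE B (Python) =====
-- import re
--
-- _NUM_PREFIX = re.compile(r'[0-9.]*')
--
-- def encontrar_longitud_de_numero_en_cadena(cadena):
--     return _NUM_PREFIX.match(cadena).end()
-- ===== Notes on version B (the rewrite author's own statement) =====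
-- stated objective: idiomatic
-- what changed: Replaces the per-character loop with an explicit counter by a single anchored regex match over the class [0-9.], returning the match end (the prefix length).
import Mathlib
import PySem

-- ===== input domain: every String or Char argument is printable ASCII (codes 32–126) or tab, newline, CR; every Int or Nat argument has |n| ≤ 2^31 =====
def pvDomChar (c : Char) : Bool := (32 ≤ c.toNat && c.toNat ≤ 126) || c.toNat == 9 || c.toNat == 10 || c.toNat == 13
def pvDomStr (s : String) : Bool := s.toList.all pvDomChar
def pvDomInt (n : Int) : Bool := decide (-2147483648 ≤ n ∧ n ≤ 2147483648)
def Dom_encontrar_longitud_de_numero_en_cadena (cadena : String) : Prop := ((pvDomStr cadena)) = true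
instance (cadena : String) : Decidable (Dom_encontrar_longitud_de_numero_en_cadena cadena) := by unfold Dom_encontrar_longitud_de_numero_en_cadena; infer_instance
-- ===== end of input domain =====

-- B replaces A's per-character counting loop by an anchored regex match r'[0-9.]*' whose end is the
-- prefix length (idiomatic; ported as the length of the matched leading run). Same return value everywhere.

-- ===== PORT A =====
-- A's for-loop with counter i and early return on the first char not in "0123456789."
-- ('caract in caract_de_numeros' on a single char is membership of that char in the string's chars).
def pvLoopA (caract_de_numeros : List Char) : List Char → Int → Int
  | [], i => i
  | caract :: rest, i =>
      if caract_de_numeros.contains caract then pvLoopA caract_de_numeros rest (i + 1)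
      else i

def encontrar_longitud_de_numero_en_cadena (cadena : String) : Int :=
  let caract_de_numeros := "0123456789."
  pvLoopA caract_de_numeros.toList cadena.toList 0

-- ===== PORT B =====
-- re.match(r'[0-9.]*', cadena).end(): length of the leading run of chars in the class [0-9.]
-- (the regex class [0-9] is exactly Char.isDigit on this domain).
def encontrar_longitud_de_numero_en_cadena_alt (cadena : String) : Int :=
  ((cadena.toList.takeWhile fun c => c.isDigit || c == '.').length : Int)

-- ===== PRECONDITION & SPEC =====
def Spec_encontrar_longitud_de_numero_en_cadena (cadena : String) (out : Int) : Prop := out = encontrar_longitud_de_numero_en_cadena_alt cadena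
instance (cadena : String) (out : Int) : Decidable (Spec_encontrar_longitud_de_numero_en_cadena cadena out) := by unfold Spec_encontrar_longitud_de_numero_en_cadena; infer_instance

-- ===== CLAIM (what is proved, stated in full; the proofs are below) =====
def Claim_equal_encontrar_longitud_de_numero_en_cadena : Prop := ∀ (cadena : String), Dom_encontrar_longitud_de_numero_en_cadena cadena → Spec_encontrar_longitud_de_numero_en_cadena cadena (encontrar_longitud_de_numero_en_cadena cadena)

-- ===== LEMMAS AND PROOFS =====

-- membership in "0123456789." coincides with the regex class test isDigit ∨ '.'
theorem pv_mem_iff (c : Char) : ("0123456789.".toList.contains c) = (c.isDigit || c == '.') := by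
  show (['0','1','2','3','4','5','6','7','8','9','.'].contains c) = _
  simp only [List.contains_cons, List.contains_nil, Bool.or_false]
  rcases c with ⟨⟨v, hv⟩⟩
  apply Bool.eq_iff_iff.mpr
  simp only [Char.isDigit, Bool.or_eq_true, beq_iff_eq, Char.ext_iff,
    Bool.and_eq_true, decide_eq_true_eq, UInt32.le_iff_toNat_le, UInt32.ext_iff]
  have h0 : ({ toBitVec := { toFin := ⟨v, hv⟩ } } : UInt32).toNat = v := rfl
  rw [h0]
  have : '0'.val.toNat = 48 := rfl
  rw [this]
  have : '1'.val.toNat = 49 := rfl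
  rw [this]
  have : '2'.val.toNat = 50 := rfl
  rw [this]
  have : '3'.val.toNat = 51 := rfl
  rw [this]
  have : '4'.val.toNat = 52 := rfl
  rw [this]
  have : '5'.val.toNat = 53 := rfl
  rw [this]
  have : '6'.val.toNat = 54 := rfl
  rw [this]
  have : '7'.val.toNat = 55 := rfl
  rw [this]
  have : '8'.val.toNat = 56 := rfl
  rw [this]
  have : '9'.val.toNat = 57 := rfl
  rw [this]
  have : '.'.val.toNat = 46 := rfl
  rw [this]
  omega

-- A's loop counts exactly the takeWhile-length of the class, offset by the incoming counter.
theorem pv_loopA_eq (l : List Char) (i : Int) :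
    pvLoopA "0123456789.".toList l i =
      i + ((l.takeWhile fun c => c.isDigit || c == '.').length : Int) := by
  induction l generalizing i with
  | nil => simp [pvLoopA, List.takeWhile]
  | cons c rest ih =>
      rw [pvLoopA, pv_mem_iff c]
      by_cases h : (c.isDigit || c == '.') = true
      · simp only [h, if_true, ih, List.takeWhile_cons, List.length_cons]
        push_cast; ring
      · simp [List.takeWhile, h]

-- ===== VERDICT (by name: the statement is the Claim_ definition above) =====
theorem encontrar_longitud_de_numero_en_cadena_spec : Claim_equal_encontrar_longitud_de_numero_en_cadena := by
  intro cadena _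
  show _ = _
  unfold encontrar_longitud_de_numero_en_cadena encontrar_longitud_de_numero_en_cadena_alt
  rw [pv_loopA_eq]
  ring
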